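-- pv_equiv track=rewrite | github.com/BanhMiRuoc/Database | lab/klab/BTL/Cau2.py | child
-- ===== SOURCE A (Python) =====
-- def child(TG_List):
--     list = []
--     for i in range(1, int(2 ** len(TG_List))):
--         binary = bin(i)[2:]
--         bi_len = len(binary)
--         sub = ""
--         binary = "0" * (len(TG_List) - bi_len) + binary
--
--         for j in range(len(TG_List)):
--             if binary[j] == '1':
--                 if len(sub) == 0:
--                     sub += TG_List[j]
--                 else:
--                     sub += ", " + TG_List[j]
--         list.append(sub)
--     return list
-- ===== SOURCE B (Python) =====
-- def child(TG_List):
--     def subsets(items):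
--         if not items:
--             return [[]]
--         rest = subsets(items[1:])
--         return rest + [[items[0]] + s for s in rest]
--     result = []
--     for s in subsets(TG_List)[1:]:
--         text = ""
--         for y in s:
--             text = y if text == "" else text + ", " + y
--         result.append(text)
--     return result
-- ===== Notes on version B (the rewrite author's own statement) =====
-- stated objective: alternative
-- what changed: B builds the powerset by structural recursion (subsets(rest) + [[head]+s ...]) and joins each subset with an accumulator fold, instead of A's counting i over 1..2^n and decoding each i via a zero-padded bin(i) string with an indexed inner scan.
import Mathlib
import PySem

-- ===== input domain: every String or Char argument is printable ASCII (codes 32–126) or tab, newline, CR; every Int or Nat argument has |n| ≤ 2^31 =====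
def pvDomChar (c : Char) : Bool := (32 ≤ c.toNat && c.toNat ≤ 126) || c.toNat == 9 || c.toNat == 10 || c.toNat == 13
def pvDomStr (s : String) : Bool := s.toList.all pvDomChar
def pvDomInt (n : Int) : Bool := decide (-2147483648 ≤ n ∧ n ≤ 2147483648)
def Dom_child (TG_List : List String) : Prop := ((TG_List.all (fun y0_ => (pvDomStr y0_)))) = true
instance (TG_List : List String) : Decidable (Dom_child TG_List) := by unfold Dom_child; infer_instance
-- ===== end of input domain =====

-- B replaces A's binary-counter subset enumeration by a recursive powerset (objective: alternative decomposition, same cost).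

-- ===== PORT A =====
-- Port of Python's bin(i)[2:] (binary digits, MSB first, no '0b' prefix); exact for every Nat.
def binAux : Nat → List Char
  | 0 => []
  | n + 1 => binAux ((n + 1) / 2) ++ [if (n + 1) % 2 = 1 then '1' else '0']
  termination_by n => n
  decreasing_by exact Nat.div_lt_self (Nat.succ_pos n) one_lt_two

def binChars (n : Nat) : List Char := if n = 0 then ['0'] else binAux n

-- A's loop indices i, j are nonnegative and in range, so pyGetD is exact here.
def child (TG_List : List String) : List String :=
  (PySem.List.pyRange 1 (2 ^ TG_List.length) 1).foldl (fun list i =>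
    let binary := binChars i.toNat          -- bin(i)[2:]; i ≥ 1 inside the range
    let bi_len := binary.length
    let sub : String := ""
    let binary := List.replicate (TG_List.length - bi_len) '0' ++ binary
    let sub := (PySem.List.pyRange 0 TG_List.length 1).foldl (fun sub j =>
      if PySem.List.pyGetD binary j ' ' = '1' then
        (if sub = "" then sub ++ PySem.List.pyGetD TG_List j ""
         else sub ++ ", " ++ PySem.List.pyGetD TG_List j "")
      else sub) sub
    list ++ [sub]) []

-- ===== PORT B =====
def subsetsB : List String → List (List String)
  | [] => [[]]
  | x :: rest => subsetsB rest ++ (subsetsB rest).map (fun s => x :: s)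

def child_alt (TG_List : List String) : List String :=
  (PySem.List.slice (subsetsB TG_List) (some 1) none).foldl (fun result s =>
    result ++ [s.foldl (fun text y => if text = "" then y else text ++ ", " ++ y) ""]) []

-- ===== PRECONDITION & SPEC =====
def Spec_child (TG_List : List String) (out : List String) : Prop := out = child_alt TG_List
instance (TG_List : List String) (out : List String) : Decidable (Spec_child TG_List out) := by unfold Spec_child; infer_instance

-- ===== CLAIM (what is proved, stated in full; the proofs are below) =====
def Claim_equal_child : Prop := ∀ (TG_List : List String), Dom_child TG_List → Spec_child TG_List (child TG_List)

-- ===== LEMMAS AND PROOFS =====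

-- A's step on the accumulated string sub.
def stepA (sub y : String) : String := if sub = "" then sub ++ y else sub ++ ", " ++ y

-- A's inner loop, structurally on the two lists (binary digits / elements).
def rowFold : List Char → List String → String → String
  | b :: bs, y :: l, sub => rowFold bs l (if b = '1' then stepA sub y else sub)
  | _, _, sub => sub

def pad (n : Nat) (cs : List Char) : List Char := List.replicate (n - cs.length) '0' ++ cs

lemma binAux_length_le : ∀ (n k : Nat), k < 2 ^ n → (binAux k).length ≤ n := by
  intro n
  induction n with
  | zero => intro k hk; interval_cases k; simp [binAux]
  | succ n ih =>
    intro k hk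
    match k with
    | 0 => simp [binAux]
    | m + 1 =>
      rw [binAux]
      have h2 : (m + 1) / 2 < 2 ^ n := by
        have := Nat.pow_succ 2 n ▸ hk; omega
      have := ih _ h2
      simp only [List.length_append, List.length_cons, List.length_nil]
      omega

lemma binAux_pow_add : ∀ (n k : Nat), k < 2 ^ n →
    binAux (2 ^ n + k) = '1' :: pad n (binAux k) := by
  intro n
  induction n with
  | zero =>
    intro k hk; interval_cases k
    show binAux (0 + 1) = _
    rw [binAux]; simp [binAux, pad]
  | succ n ih =>
    intro k hk
    have hpow : (2 : Nat) ^ (n + 1) = 2 ^ n + 2 ^ n := by ring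
    have hpos : 0 < (2 : Nat) ^ n := Nat.two_pow_pos n
    have hsplit : 2 ^ (n + 1) + k = (2 ^ (n + 1) + k - 1) + 1 := by omega
    rw [hsplit, binAux]
    have hdiv : (2 ^ (n + 1) + k - 1 + 1) / 2 = 2 ^ n + k / 2 := by omega
    have hmod : (2 ^ (n + 1) + k - 1 + 1) % 2 = k % 2 := by omega
    rw [hdiv, hmod, ih _ (by omega : k / 2 < 2 ^ n)]
    rcases Nat.eq_zero_or_pos k with hk0 | hkpos
    · subst hk0
      simp [binAux, pad, List.replicate_succ']
    · have hk1 : k = (k - 1) + 1 := by omega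
      conv_rhs => rw [hk1, binAux]
      have e1 : k - 1 + 1 = k := by omega
      rw [e1]
      simp only [List.cons_append, List.cons.injEq, true_and]
      simp only [pad, List.length_append, List.length_cons, List.length_nil, List.append_assoc]
      congr 1
      congr 1
      omega

lemma rowFold_cons_zero (bs : List Char) (y : String) (l : List String) (sub : String) :
    rowFold ('0' :: bs) (y :: l) sub = rowFold bs l sub := by
  simp [rowFold]

lemma rowFold_cons_one (bs : List Char) (y : String) (l : List String) (sub : String) :
    rowFold ('1' :: bs) (y :: l) sub = rowFold bs l (stepA sub y) := by
  simp [rowFold]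

lemma pad_length {n : Nat} {cs : List Char} (h : cs.length ≤ n) : (pad n cs).length = n := by
  simp [pad]; omega

lemma pad_succ {n : Nat} {cs : List Char} (h : cs.length ≤ n) :
    pad (n + 1) cs = '0' :: pad n cs := by
  have h1 : n + 1 - cs.length = (n - cs.length) + 1 := by omega
  simp [pad, h1, List.replicate_succ]

lemma pad_eq_self {n : Nat} {cs : List Char} (h : cs.length = n) : pad n cs = cs := by
  simp [pad, h]

-- A's inner loop (fold over range with getD-indexing) is rowFold.
lemma inner_eq : ∀ (l : List String) (bs : List Char) (sub : String), bs.length = l.length →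
    (List.range l.length).foldl (fun sub j =>
      if bs.getD j ' ' = '1' then
        (if sub = "" then sub ++ l.getD j "" else sub ++ ", " ++ l.getD j "")
      else sub) sub
      = rowFold bs l sub := by
  intro l
  induction l with
  | nil => intro bs sub _; simp [rowFold]
  | cons y l ih =>
    intro bs sub hlen
    match bs with
    | b :: bs =>
      rw [List.length_cons, List.range_succ_eq_map]
      simp only [List.foldl_cons, List.foldl_map, List.getD_cons_zero, List.getD_cons_succ,
        Nat.succ_eq_add_one]
      rw [ih bs _ (by simpa using hlen)]
      rcases eq_or_ne b '1' with h | h <;> simp [rowFold, stepA, h]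

-- The core correspondence: the rows of A's binary enumeration, for all k < 2^n at once,
-- are the folds over the subsets in B's recursive powerset order.
lemma main_eq : ∀ (l : List String) (acc : String),
    (List.range (2 ^ l.length)).map (fun k => rowFold (pad l.length (binAux k)) l acc)
      = (subsetsB l).map (fun s => List.foldl stepA acc s) := by
  intro l
  induction l with
  | nil => intro acc; simp [subsetsB, pad, rowFold]
  | cons x l ih =>
    intro acc
    have hpow : 2 ^ (x :: l).length = 2 ^ l.length + 2 ^ l.length := by
      simp [List.length_cons]; ring
    rw [hpow, List.range_add, List.map_append, List.map_map]
    have part1 : (List.range (2 ^ l.length)).map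
        (fun k => rowFold (pad (x :: l).length (binAux k)) (x :: l) acc)
        = (subsetsB l).map (fun s => List.foldl stepA acc s) := by
      rw [← ih acc]
      apply List.map_congr_left
      intro k hk
      rw [List.mem_range] at hk
      have hlen := binAux_length_le _ _ hk
      rw [List.length_cons, pad_succ hlen, rowFold_cons_zero]
    have part2 : (List.range (2 ^ l.length)).map
        ((fun k => rowFold (pad (x :: l).length (binAux k)) (x :: l) acc) ∘
          (fun k => 2 ^ l.length + k))
        = ((subsetsB l).map (fun s => x :: s)).map (fun s => List.foldl stepA acc s) := by
      have e1 : (List.range (2 ^ l.length)).map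
          ((fun k => rowFold (pad (x :: l).length (binAux k)) (x :: l) acc) ∘
            (fun k => 2 ^ l.length + k))
          = (List.range (2 ^ l.length)).map
            (fun k => rowFold (pad l.length (binAux k)) l (stepA acc x)) := by
        apply List.map_congr_left
        intro k hk
        rw [List.mem_range] at hk
        have hlen := binAux_length_le _ _ hk
        simp only [Function.comp_apply]
        rw [List.length_cons, binAux_pow_add _ _ hk,
          pad_eq_self (by rw [List.length_cons, pad_length hlen]), rowFold_cons_one]
      rw [e1, ih (stepA acc x), List.map_map]
      apply List.map_congr_left
      intro s _
      simp [List.foldl_cons]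
    rw [part1, part2, subsetsB, List.map_append]

-- step functions of the two ports agree ("" ++ y = y).
lemma stepA_eq_stepB :
    stepA = fun text y => if text = "" then y else text ++ ", " ++ y := by
  funext t y
  rcases eq_or_ne t "" with h | h <;> simp [stepA, h]

-- A as a map of rows over Nat indices 1 .. 2^n - 1.
lemma child_eq (l : List String) :
    child l = (List.range (2 ^ l.length - 1)).map
      (fun k => rowFold (pad l.length (binAux (k + 1))) l "") := by
  unfold child
  rw [PySem.List.foldl_append_singleton_eq_map, List.nil_append,
    PySem.List.pyRange_one 1, List.map_map]
  have hcast : ((2 : Int) ^ l.length - 1).toNat = 2 ^ l.length - 1 := by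
    have h2 : ((2 : Int) ^ l.length) = ((2 ^ l.length : Nat) : Int) := by push_cast; ring
    rw [h2]
    have := Nat.one_le_two_pow (n := l.length)
    omega
  rw [hcast]
  apply List.map_congr_left
  intro k hk
  rw [List.mem_range] at hk
  simp only [Function.comp_apply]
  have htoNat : ((1 : Int) + (k : Int)).toNat = k + 1 := by omega
  have hne : ¬ (k + 1 = 0) := by omega
  have hk1 : k + 1 < 2 ^ l.length := by
    have := Nat.one_le_two_pow (n := l.length); omega
  have hlen : (binAux (k + 1)).length ≤ l.length := binAux_length_le _ _ hk1
  simp only [htoNat, binChars, hne, if_false]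
  rw [PySem.List.pyRange_zero_nat, List.foldl_map]
  simp only [PySem.List.pyGetD_natCast]
  simp only [pad]
  exact inner_eq l _ "" (pad_length (cs := binAux (k + 1)) hlen)

-- B as a map over the tail of the powerset.
lemma child_alt_eq (l : List String) :
    child_alt l = ((subsetsB l).map (fun s => List.foldl stepA "" s)).tail := by
  unfold child_alt
  rw [PySem.List.slice_from _ (by norm_num : (0 : Int) ≤ 1),
    PySem.List.foldl_append_singleton_eq_map, List.nil_append, ← stepA_eq_stepB,
    show (1 : Int).toNat = 1 from rfl, List.drop_one, List.map_tail]

-- ===== VERDICT (by name: the statement is the Claim_ definition above) =====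
theorem child_spec : Claim_equal_child := by
  intro l _
  show child l = child_alt l
  rw [child_eq, child_alt_eq, ← main_eq l ""]
  have h1 : 2 ^ l.length = (2 ^ l.length - 1) + 1 := by
    have := Nat.one_le_two_pow (n := l.length); omega
  rw [h1, List.range_succ_eq_map, List.map_cons, List.tail_cons, List.map_map]
  rfl
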